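-- pv_equiv track=rewrite | github.com/OriC28/temporal | Python/Práctica/algoritmo_repeticiones.py | secuencia_repetidas
-- ===== SOURCE A (Python) =====
-- def secuencia_repetidas(message):
-- 	if not message:
-- 		return []
--
-- 	repetidas = []
-- 	secuencia = message[0]
--
-- 	for i in range(1, len(message)):
-- 		if message[i] == message[i - 1]:
-- 			secuencia += message[i]
-- 		else:
-- 			if len(secuencia)>=3 and len(secuencia)<=5:
-- 				repetidas.append(secuencia)
-- 			secuencia = message[i]
--
-- 	if len(secuencia)>=3 and len(secuencia)<=5:
-- 		repetidas.append(secuencia)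
--
-- 	return repetidas
-- ===== SOURCE B (Python) =====
-- def secuencia_repetidas(message):
--     repetidas = []
--     i = 0
--     n = len(message)
--     while i < n:
--         j = i + 1
--         while j < n and message[j] == message[i]:
--             j += 1
--         if 3 <= j - i <= 5:
--             repetidas.append(message[i:j])
--         i = j
--     return repetidas
-- ===== Notes on version B (the rewrite author's own statement) =====
-- stated objective: alternative
-- what changed: Replaces A's stateful scan that accumulates the current run char-by-char into a growing string with a two-pointer loop that finds each maximal run's end index and slices the run out directly, length-filtering by index difference.
import Mathlib
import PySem

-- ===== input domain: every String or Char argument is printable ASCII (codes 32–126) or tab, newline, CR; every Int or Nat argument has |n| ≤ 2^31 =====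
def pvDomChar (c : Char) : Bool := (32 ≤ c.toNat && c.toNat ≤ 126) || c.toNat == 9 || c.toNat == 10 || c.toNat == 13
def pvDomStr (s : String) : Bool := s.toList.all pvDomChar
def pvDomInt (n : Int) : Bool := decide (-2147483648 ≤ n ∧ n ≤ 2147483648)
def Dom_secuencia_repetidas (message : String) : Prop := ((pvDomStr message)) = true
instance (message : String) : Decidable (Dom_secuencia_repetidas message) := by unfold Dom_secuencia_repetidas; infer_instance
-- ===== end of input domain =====

-- B replaces A's stateful scan accumulating a growing run string with a two-pointer
-- loop that locates each maximal run's end and slices it out (alternative, same cost).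


-- ===== PORT A =====
-- A's for-loop over i in range(1, n): structural recursion carrying the previous
-- char (message[i-1]), the accumulated run 'secuencia' and the output 'repetidas'.
def secuenciaGoA (repetidas : List String) (secuencia : List Char) (prev : Char) :
    List Char → List String
  | [] =>
      if 3 ≤ secuencia.length ∧ secuencia.length ≤ 5 then repetidas ++ [String.mk secuencia]
      else repetidas
  | c :: rest =>
      if c == prev then
        secuenciaGoA repetidas (secuencia ++ [c]) c rest
      else if 3 ≤ secuencia.length ∧ secuencia.length ≤ 5 then
        secuenciaGoA (repetidas ++ [String.mk secuencia]) [c] c rest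
      else
        secuenciaGoA repetidas [c] c rest

def secuencia_repetidas (message : String) : List String :=
  match message.toList with
  | [] => []
  | c :: rest => secuenciaGoA [] [c] c rest

-- ===== PORT B =====
-- B's outer while-loop: at the head char, scan forward to the end of its maximal
-- run (inner while), emit the slice if its length is in [3,5], continue after it.
def secuenciaGoB : List Char → List String
  | [] => []
  | c :: rest =>
      let run := rest.takeWhile (· == c)
      (if 3 ≤ run.length + 1 ∧ run.length + 1 ≤ 5 then [String.mk (c :: run)] else []) ++
        secuenciaGoB (rest.dropWhile (· == c))
termination_by cs => cs.length
decreasing_by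
  simpa using Nat.lt_succ_of_le (List.length_dropWhile_le _ _)

def secuencia_repetidas_alt (message : String) : List String :=
  secuenciaGoB message.toList

-- ===== PRECONDITION & SPEC =====
def Spec_secuencia_repetidas (message : String) (out : List String) : Prop := out = secuencia_repetidas_alt message
instance (message : String) (out : List String) : Decidable (Spec_secuencia_repetidas message out) := by unfold Spec_secuencia_repetidas; infer_instance

-- ===== CLAIM (what is proved, stated in full; the proofs are below) =====
def Claim_equal_secuencia_repetidas : Prop := ∀ (message : String), Dom_secuencia_repetidas message → Spec_secuencia_repetidas message (secuencia_repetidas message)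

-- ===== LEMMAS AND PROOFS =====

-- characters kept by takeWhile (· == c) are all c
theorem takeWhile_eq_replicate (l : List Char) (c : Char) :
    l.takeWhile (· == c) = List.replicate (l.takeWhile (· == c)).length c := by
  induction l with
  | nil => simp
  | cons a rest ih =>
    by_cases h : a = c
    · subst h; simpa [List.takeWhile_cons, List.replicate_succ] using ih
    · simp [h]

theorem cons_replicate_run (c : Char) (n : Nat) :
    c :: List.replicate n c = List.replicate (0 + 1 + n) c := by
  rw [show 0 + 1 + n = n + 1 from by omega, List.replicate_succ]

-- A's loop, started mid-run with 'secuencia' = m+1 copies of prev, emits the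
-- completed current run (length-filtered) and then behaves like B's loop.
theorem secuenciaGoA_eq (rest : List Char) : ∀ (rep : List String) (m : Nat) (prev : Char),
    secuenciaGoA rep (List.replicate (m + 1) prev) prev rest =
      rep ++
        (if 3 ≤ m + 1 + (rest.takeWhile (· == prev)).length ∧
              m + 1 + (rest.takeWhile (· == prev)).length ≤ 5 then
            [String.mk (List.replicate (m + 1 + (rest.takeWhile (· == prev)).length) prev)]
          else []) ++
        secuenciaGoB (rest.dropWhile (· == prev)) := by
  induction rest with
  | nil =>
    intro rep m prev
    simp only [secuenciaGoA, List.takeWhile_nil, List.dropWhile_nil, secuenciaGoB,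
      List.length_replicate, List.length_nil, Nat.add_zero, List.append_nil]
    split <;> simp
  | cons c rs ih =>
    intro rep m prev
    by_cases h : c = prev
    · subst h
      have h1 : List.replicate (m + 1) c ++ [c] = List.replicate (m + 1 + 1) c := by
        simp [List.replicate_succ' (n := m + 1)]
      simp only [secuenciaGoA, BEq.rfl, if_true, h1, ih rep (m + 1) c,
        List.takeWhile_cons, List.dropWhile_cons, List.length_cons]
      ring_nf
    · have hb : (c == prev) = false := by simp [h]
      simp only [secuenciaGoA, hb, List.takeWhile_cons, List.dropWhile_cons,
        Bool.false_eq_true, if_false, List.length_replicate, List.length_nil, Nat.add_zero]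
      have hrun : (c :: rs.takeWhile (· == c)) =
          List.replicate (0 + 1 + (rs.takeWhile (· == c)).length) c := by
        conv_lhs => rw [takeWhile_eq_replicate rs c]
        exact cons_replicate_run c _
      by_cases hc : 3 ≤ m + 1 ∧ m + 1 ≤ 5
      · have ih1 := ih (rep := rep ++ [String.mk (List.replicate (m + 1) prev)]) (m := 0) (prev := c)
        rw [show List.replicate (0 + 1) c = [c] from rfl] at ih1
        simp only [if_pos hc, ih1, secuenciaGoB, ← hrun, List.append_assoc]
        split_ifs with h1 h2 <;> first | rfl | omega
      · have ih0 := ih (rep := rep) (m := 0) (prev := c)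
        rw [show List.replicate (0 + 1) c = [c] from rfl] at ih0
        simp only [if_neg hc, ih0, secuenciaGoB, ← hrun, List.append_assoc, List.nil_append]
        split_ifs with h1 h2 <;> first | rfl | omega

-- ===== VERDICT (by name: the statement is the Claim_ definition above) =====
theorem secuencia_repetidas_spec : Claim_equal_secuencia_repetidas := by
  intro message _
  unfold Spec_secuencia_repetidas secuencia_repetidas secuencia_repetidas_alt
  cases hm : message.toList with
  | nil => simp [secuenciaGoB]
  | cons c rest =>
    show secuenciaGoA [] [c] c rest = secuenciaGoB (c :: rest)
    have key := secuenciaGoA_eq rest [] 0 c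
    rw [show List.replicate (0 + 1) c = [c] from rfl] at key
    have hrun : (c :: rest.takeWhile (· == c)) =
        List.replicate (0 + 1 + (rest.takeWhile (· == c)).length) c := by
      conv_lhs => rw [takeWhile_eq_replicate rest c]
      exact cons_replicate_run c _
    rw [key, secuenciaGoB, ← hrun]
    simp only [List.nil_append, List.append_cancel_right_eq]
    split_ifs with h1 h2 <;> first | rfl | omega
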